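-- pv_equiv track=rewrite | github.com/pausic/ALM | SAR_searcher_tolerancia.py | busca_posicional
-- ===== SOURCE A (Python) =====
-- def busca_posicional(indice,consulta):
--     consulta = consulta.split(" ")
--     consulta[0] = consulta[0][1:]
--     lc = len(consulta)
--     lp = len(consulta[lc-1])
--     consulta[lc-1] = consulta[lc-1][:lp-1]
--     resultado=[]
--     dic=dict()
--     i = 1
--     dic[consulta[0]]= indice.get(consulta[0], {})
--     docs = dic.get(consulta[0], {})
--     if len(docs.items()) != 0:
--         docs = sorted(docs.keys())
--     else:
--         docs = []
--
--     while i<len(consulta):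
--         dic[consulta[i]]= indice.get(consulta[i], {})
--         doc = dic.get(consulta[i], {})
--         if len(doc.items()) != 0:
--             doc = sorted(doc.keys())
--         else:
--             doc = []
--         docs= and_op(docs,doc)
--         i+=1
--
--     for elem in docs:
--         for pos_ini in sorted(dic[consulta[0]].get(elem, [])):
--             i=1
--             cont=True
--             while i<len(consulta) and cont:
--                 cont=False
--                 for pos in sorted(dic[consulta[i]].get(elem, [])):
--                     if pos == pos_ini + i:
--                         i+=1
--                         cont=True
--                         break
--                     elif pos_ini < pos:
--                         break
--             if cont:
--                 resultado.append(elem)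
--                 break
--     return resultado
--
-- def and_op(lista1, lista2):
--     resultado = []
--     i=j=0
--     while i<len(lista1) and j < len(lista2):
--         if(lista1[i]==lista2[j]):
--             resultado.append(lista1[i])
--             i+=1
--             j+=1
--             continue
--         if(lista1[i]<lista2[j]):
--             i+=1
--         else:
--             j+=1
--     return resultado
-- ===== SOURCE B (Python) =====
-- def busca_posicional(indice, consulta):
--     terms = consulta.split(" ")
--     terms[0] = terms[0][1:]
--     terms[-1] = terms[-1][:len(terms[-1]) - 1]
--     # candidate docs: sorted keys of the first term's postings, kept only if
--     # present in every other term's postings (hash membership, no merge scan)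
--     first = indice.get(terms[0], {})
--     rest = [indice.get(t, {}) for t in terms[1:]]
--     docs = [d for d in sorted(first.keys()) if all(d in p for p in rest)]
--
--     def _first_gt(a, x):
--         # index of the first element of sorted list a strictly greater than x
--         lo, hi = 0, len(a)
--         while lo < hi:
--             mid = (lo + hi) // 2
--             if a[mid] <= x:
--                 lo = mid + 1
--             else:
--                 hi = mid
--         return lo
--
--     resultado = []
--     for d in docs:
--         pls = [sorted(p.get(d, [])) for p in [first] + rest]
--         if any(all((j := _first_gt(pls[i], p)) < len(pls[i]) and pls[i][j] == p + i
--                    for i in range(1, len(terms)))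
--                for p in pls[0]):
--             resultado.append(d)
--     return resultado
-- ===== Notes on version B (the rewrite author's own statement) =====
-- stated objective: alternative
-- what changed: B replaces A's per-term sorted-list merge intersection with a hash-membership filter over the first term's sorted doc keys, and replaces A's inner linear scan (which re-sorts each term's position list for every candidate start position) with one sort per (term, doc) plus a binary search for the first position greater than pos_ini.
import Mathlib
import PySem

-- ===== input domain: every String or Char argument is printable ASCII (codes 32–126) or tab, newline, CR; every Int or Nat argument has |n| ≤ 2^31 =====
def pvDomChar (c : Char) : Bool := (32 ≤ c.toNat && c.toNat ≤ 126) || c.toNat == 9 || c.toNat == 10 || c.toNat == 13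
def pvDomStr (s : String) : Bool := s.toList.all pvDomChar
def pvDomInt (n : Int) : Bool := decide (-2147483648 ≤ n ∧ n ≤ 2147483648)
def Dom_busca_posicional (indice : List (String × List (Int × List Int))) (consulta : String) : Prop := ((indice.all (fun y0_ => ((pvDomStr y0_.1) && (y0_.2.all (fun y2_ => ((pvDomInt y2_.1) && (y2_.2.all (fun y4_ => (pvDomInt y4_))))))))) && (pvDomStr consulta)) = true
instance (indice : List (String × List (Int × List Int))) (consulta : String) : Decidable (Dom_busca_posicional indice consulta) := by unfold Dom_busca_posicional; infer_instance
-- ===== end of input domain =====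

-- B replaces A's repeated merge-intersections and per-start-position re-sorting by a hash-membership
-- doc filter and one sort + binary search per (term, doc); return values proved equal under Pre_.

-- shared input/query preparation (identical lines in both Pythons: dict argument, query parsing)
def pyMkIndex (indice : List (String × List (Int × List Int))) : PySem.Dict String (PySem.Dict Int (List Int)) :=
  PySem.Dict.mk (indice.map (fun p => (p.1, PySem.Dict.mk p.2)))

def pyParse (consulta : String) : List String :=
  let cs := (PySem.Str.split? consulta " ").getD []      -- consulta.split(" "); sep ≠ "" so always some
  let cs := match cs with                                 -- consulta[0] = consulta[0][1:]  (split is never empty)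
    | [] => []
    | c0 :: rest => (PySem.Str.slice c0 (some 1) none) :: rest
  let lc := cs.length
  let last := cs.getD (lc - 1) ""
  cs.set (lc - 1) (PySem.Str.slice last none (some (PySem.Str.len last - 1)))  -- consulta[lc-1] = consulta[lc-1][:lp-1]

-- ===== PORT A =====
def pyAndOp : List Int → List Int → List Int
  | [], _ => []
  | _ :: _, [] => []
  | a :: l1, b :: l2 =>
    if a = b then a :: pyAndOp l1 l2
    else if a < b then pyAndOp l1 (b :: l2)
    else pyAndOp (a :: l1) l2
termination_by l1 l2 => l1.length + l2.length

-- sorted(dic[t].get(elem, []))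
def pySortedPos (dic : PySem.Dict String (PySem.Dict Int (List Int))) (t : String) (elem : Int) : List Int :=
  PySem.List.sorted ((dic.getD t PySem.Dict.empty).getD elem []) (fun x => x)

-- the inner 'for pos in sorted(...)' with its two breaks
def pyScanA (posIni target : Int) : List Int → Bool
  | [] => false
  | p :: rest => if p = target then true else if posIni < p then false else pyScanA posIni target rest

-- the 'while i < len(consulta) and cont' loop
def pyCheckA (dic : PySem.Dict String (PySem.Dict Int (List Int))) (cs : List String) (elem posIni : Int) (i : Nat) : Bool :=
  if i < cs.length then
    (if pyScanA posIni (posIni + (i : Int)) (pySortedPos dic (cs.getD i "") elem) then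
       pyCheckA dic cs elem posIni (i + 1)
     else false)
  else true
termination_by cs.length - i

-- 'for pos_ini in sorted(...): ... if cont: append; break'
def pyFirstPosA (dic : PySem.Dict String (PySem.Dict Int (List Int))) (cs : List String) (elem : Int) : List Int → Bool
  | [] => false
  | p :: rest => if pyCheckA dic cs elem p 1 then true else pyFirstPosA dic cs elem rest

-- 'while i < len(consulta): dic[...] = ...; docs = and_op(docs, doc); i += 1'
def pyAndLoop (idx : PySem.Dict String (PySem.Dict Int (List Int))) (cs : List String) (i : Nat)
    (dic : PySem.Dict String (PySem.Dict Int (List Int))) (docs : List Int) :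
    PySem.Dict String (PySem.Dict Int (List Int)) × List Int :=
  if i < cs.length then
    let t := cs.getD i ""
    let dic := dic.insert t (idx.getD t PySem.Dict.empty)
    let doc := dic.getD t PySem.Dict.empty
    let doc := if doc.items.length ≠ 0 then PySem.List.sorted doc.keys (fun x => x) else []
    pyAndLoop idx cs (i + 1) dic (pyAndOp docs doc)
  else (dic, docs)
termination_by cs.length - i

def pyBodyA (idx : PySem.Dict String (PySem.Dict Int (List Int))) (cs : List String) : List Int :=
  let t0 := cs.getD 0 ""
  let dic := PySem.Dict.empty.insert t0 (idx.getD t0 PySem.Dict.empty)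
  let docs0 := dic.getD t0 PySem.Dict.empty
  let docs := if docs0.items.length ≠ 0 then PySem.List.sorted docs0.keys (fun x => x) else []
  let r := pyAndLoop idx cs 1 dic docs
  r.2.foldl (fun acc elem =>
    if pyFirstPosA r.1 cs elem (pySortedPos r.1 t0 elem) then acc ++ [elem] else acc) []

def busca_posicional (indice : List (String × List (Int × List Int))) (consulta : String) : List Int :=
  pyBodyA (pyMkIndex indice) (pyParse consulta)

-- ===== PORT B =====
-- _first_gt: binary search for the index of the first element > x
def pyFirstGTAux (a : List Int) (x : Int) (lo hi : Nat) : Nat :=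
  if lo < hi then
    let mid := (lo + hi) / 2
    if a.getD mid 0 ≤ x then pyFirstGTAux a x (mid + 1) hi else pyFirstGTAux a x lo mid
  else lo
termination_by hi - lo
decreasing_by all_goals omega

def pyFirstGT (a : List Int) (x : Int) : Nat := pyFirstGTAux a x 0 a.length

-- all(... for i in range(1, len(terms)))
def pyAllOkB (pls : List (List Int)) (p : Int) (lc i : Nat) : Bool :=
  if i < lc then
    (let l := pls.getD i []
     let j := pyFirstGT l p
     if j < l.length then
       (if l.getD j 0 = p + (i : Int) then pyAllOkB pls p lc (i + 1) else false)
     else false)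
  else true
termination_by lc - i

def pyBodyB (idx : PySem.Dict String (PySem.Dict Int (List Int))) (cs : List String) : List Int :=
  let lc := cs.length
  let first := idx.getD (cs.getD 0 "") PySem.Dict.empty
  let rest := (PySem.List.slice cs (some 1) none).map (fun t => idx.getD t PySem.Dict.empty)
  let docs := (PySem.List.sorted first.keys (fun x => x)).filter (fun d => rest.all (fun pd => pd.contains d))
  docs.foldl (fun acc d =>
    let pls := (first :: rest).map (fun pd => PySem.List.sorted (pd.getD d []) (fun x => x))
    if (pls.getD 0 []).any (fun p => pyAllOkB pls p lc 1) then acc ++ [d] else acc) []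

def busca_posicional_alt (indice : List (String × List (Int × List Int))) (consulta : String) : List Int :=
  pyBodyB (pyMkIndex indice) (pyParse consulta)

-- ===== PRECONDITION & SPEC =====
-- Pre_ excludes association lists in which some inner (document → positions) dict has duplicate
-- document keys: a Python dict can never hold duplicate keys, and on such lists A's merge
-- intersection and B's membership filter treat the accidental duplicates differently.
def Pre_busca_posicional (indice : List (String × List (Int × List Int))) (consulta : String) : Prop :=
  ∀ p ∈ indice, (p.2.map Prod.fst).Nodup
instance (indice : List (String × List (Int × List Int))) (consulta : String) : Decidable (Pre_busca_posicional indice consulta) := by unfold Pre_busca_posicional; infer_instance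

def pvWitness_busca_posicional : (List (String × List (Int × List Int))) × String :=
  ([("a", [(0, [0, 1]), (2, [5])]), ("b", [(0, [1])])], "\"a b\"")

def Spec_busca_posicional (indice : List (String × List (Int × List Int))) (consulta : String) (out : List Int) : Prop := out = busca_posicional_alt indice consulta
instance (indice : List (String × List (Int × List Int))) (consulta : String) (out : List Int) : Decidable (Spec_busca_posicional indice consulta out) := by unfold Spec_busca_posicional; infer_instance

-- ===== CLAIM (what is proved, stated in full; the proofs are below) =====
def Claim_equal_busca_posicional : Prop := ∀ (indice : List (String × List (Int × List Int))) (consulta : String), Dom_busca_posicional indice consulta → Pre_busca_posicional indice consulta → Spec_busca_posicional indice consulta (busca_posicional indice consulta)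

-- ===== LEMMAS AND PROOFS =====

lemma keys_nodup_of_pre (indice : List (String × List (Int × List Int)))
    (h : ∀ p ∈ indice, (p.2.map Prod.fst).Nodup) (t : String) :
    ((pyMkIndex indice).getD t PySem.Dict.empty).keys.Nodup := by
  rw [PySem.Dict.getD_eq_get?_getD]
  cases hg : (pyMkIndex indice).get? t with
  | none => simp [PySem.Dict.keys_empty]
  | some v =>
    have hm := PySem.Dict.mem_items_of_get?_eq_some _ hg
    simp only [pyMkIndex, PySem.Dict.items] at hm
    simp only [List.mem_map] at hm
    obtain ⟨p, hp, hpe⟩ := hm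
    have : v = PySem.Dict.mk p.2 := congrArg Prod.snd hpe |>.symm
    subst this
    simpa [PySem.Dict.keys_mk] using h p hp

lemma sorted_keys_pairwise_lt (d : PySem.Dict Int (List Int)) (h : d.keys.Nodup) :
    (PySem.List.sorted d.keys (fun x => x)).Pairwise (· < ·) := by
  have hle := PySem.List.sorted_pairwise d.keys (fun x => x)
  have hnd : (PySem.List.sorted d.keys (fun x => x)).Nodup :=
    (PySem.List.sorted_perm d.keys (fun x => x) false).nodup_iff.mpr h
  exact (hle.and hnd).imp (fun h => lt_of_le_of_ne h.1 h.2)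

lemma branch_eq (d : PySem.Dict Int (List Int)) :
    (if d.items.length ≠ 0 then PySem.List.sorted d.keys (fun x => x) else [])
      = PySem.List.sorted d.keys (fun x => x) := by
  by_cases h : d.items.length = 0
  · have : d.keys = [] := by
      simp only [PySem.Dict.keys]
      simp [List.length_eq_zero_iff.mp h]
    simp [h, this, PySem.List.sorted_eq_nil_iff]
  · simp [h]

lemma andOp_eq_filter (l1 l2 : List Int) (h1 : l1.Pairwise (· < ·)) (h2 : l2.Pairwise (· < ·)) :
    pyAndOp l1 l2 = l1.filter (fun a => l2.contains a) := by
  induction l1, l2 using pyAndOp.induct with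
  | case1 l2 => simp [pyAndOp]
  | case2 a l1 => simp [pyAndOp]
  | case3 l1 a l2 ih =>
    rw [pyAndOp]
    simp only [if_pos rfl]
    rw [ih h1.of_cons h2.of_cons]
    have hb : ∀ x ∈ l1, (l2.contains x) = ((a :: l2).contains x) := by
      intro x hx
      have hax : a < x := (List.pairwise_cons.mp h1).1 x hx
      have hxa : ¬ x = a := by omega
      simp [List.contains_cons, hxa]
    simp only [List.filter_cons, List.contains_cons, BEq.rfl, Bool.true_or, if_pos]
    congr 1
    exact (List.filter_congr (fun x hx => (hb x hx).symm)).symm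
  | case4 a l1 b l2 hne hlt ih =>
    rw [pyAndOp]
    simp only [if_neg hne, if_pos hlt]
    rw [ih h1.of_cons h2]
    have ha : ((b :: l2).contains a) = false := by
      have : ∀ x ∈ l2, b < x := (List.pairwise_cons.mp h2).1
      simp only [List.contains_cons, beq_iff_eq, Bool.or_eq_false_iff]
      constructor
      · simp [(by omega : ¬ a = b)]
      · by_contra hc
        simp only [Bool.not_eq_false, List.contains_iff_mem] at hc
        have := this a hc; omega
    rw [List.filter_cons, if_neg (by rw [ha]; exact Bool.false_ne_true)]
  | case5 a l1 b l2 hne hnlt ih =>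
    rw [pyAndOp]
    simp only [if_neg hne, if_neg hnlt]
    rw [ih h1 h2.of_cons]
    have hgt : b < a := by omega
    apply List.filter_congr
    intro x hx
    have hax : a ≤ x := by
      rcases List.mem_cons.mp hx with rfl | hx'
      · omega
      · have := (List.pairwise_cons.mp h1).1 x hx'; omega
    simp only [List.contains_cons, beq_iff_eq]
    have : ¬ x = b := by omega
    simp [this]

lemma andLoop_dic (idx : PySem.Dict String (PySem.Dict Int (List Int))) (cs : List String) :
    ∀ i dic docs t d0, ((pyAndLoop idx cs i dic docs).1).getD t d0
      = if t ∈ cs.drop i then idx.getD t PySem.Dict.empty else dic.getD t d0 := by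
  have main : ∀ n i dic docs t d0, cs.length - i ≤ n →
      ((pyAndLoop idx cs i dic docs).1).getD t d0
        = if t ∈ cs.drop i then idx.getD t PySem.Dict.empty else dic.getD t d0 := by
    intro n
    induction n with
    | zero =>
      intro i dic docs t d0 hn
      have hlt : ¬ i < cs.length := by omega
      rw [pyAndLoop, if_neg hlt]
      have hdrop : cs.drop i = [] := List.drop_eq_nil_of_le (by omega)
      simp [hdrop]
    | succ n ihn =>
      intro i dic docs t d0 hn
      by_cases hlt : i < cs.length
      · rw [pyAndLoop, if_pos hlt]
        simp only
        rw [ihn (i + 1) _ _ t d0 (by omega)]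
        have hsplit : t ∈ cs.drop i ↔ t = cs[i] ∨ t ∈ cs.drop (i + 1) := by
          rw [List.drop_eq_getElem_cons hlt, List.mem_cons]
        by_cases hmem : t ∈ cs.drop (i + 1)
        · rw [if_pos hmem, if_pos (hsplit.mpr (Or.inr hmem))]
        · rw [if_neg hmem]
          by_cases he : t = cs[i]
          · rw [if_pos (hsplit.mpr (Or.inl he))]
            rw [← List.getD_eq_getElem cs "" hlt] at he
            rw [he, PySem.Dict.getD_insert_self]
          · rw [if_neg (fun h => (hsplit.mp h).elim he hmem)]
            rw [PySem.Dict.getD_insert, if_neg (by rw [← List.getD_eq_getElem cs "" hlt] at he; exact he)]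
      · rw [pyAndLoop, if_neg hlt]
        have hdrop : cs.drop i = [] := List.drop_eq_nil_of_le (by omega)
        simp [hdrop]
  intro i dic docs t d0
  exact main (cs.length - i) i dic docs t d0 le_rfl

lemma andLoop_docs (idx : PySem.Dict String (PySem.Dict Int (List Int))) (cs : List String)
    (hnd : ∀ t, (idx.getD t PySem.Dict.empty).keys.Nodup) :
    ∀ i dic docs, docs.Pairwise (· < ·) → ((pyAndLoop idx cs i dic docs).2)
      = docs.filter (fun d => (cs.drop i).all (fun t => (idx.getD t PySem.Dict.empty).contains d)) := by
  have main : ∀ n i dic docs, cs.length - i ≤ n → docs.Pairwise (· < ·) →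
      ((pyAndLoop idx cs i dic docs).2)
        = docs.filter (fun d => (cs.drop i).all (fun t => (idx.getD t PySem.Dict.empty).contains d)) := by
    intro n
    induction n with
    | zero =>
      intro i dic docs hn hp
      have hlt : ¬ i < cs.length := by omega
      rw [pyAndLoop, if_neg hlt]
      have hdrop : cs.drop i = [] := List.drop_eq_nil_of_le (by omega)
      simp [hdrop]
    | succ n ihn =>
      intro i dic docs hn hp
      by_cases hlt : i < cs.length
      · rw [pyAndLoop, if_pos hlt]
        simp only
        rw [PySem.Dict.getD_insert_self, branch_eq]
        set t := cs.getD i "" with ht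
        set sk := PySem.List.sorted (idx.getD t PySem.Dict.empty).keys (fun x => x) with hsk
        have hsklt : sk.Pairwise (· < ·) := sorted_keys_pairwise_lt _ (hnd t)
        rw [andOp_eq_filter docs sk hp hsklt]
        rw [ihn (i + 1) _ _ (by omega) (List.Pairwise.filter _ hp)]
        rw [List.filter_filter]
        apply List.filter_congr
        intro d _
        have hcd : sk.contains d = (idx.getD t PySem.Dict.empty).contains d := by
          simp only [List.contains_iff_mem, hsk, PySem.List.mem_sorted]
          rw [Bool.eq_iff_iff]
          simp [PySem.Dict.contains_iff_mem_keys, List.contains_iff_mem]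
        show ((cs.drop (i + 1)).all _ && sk.contains d)
              = (cs.drop i).all (fun t => (idx.getD t PySem.Dict.empty).contains d)
        rw [List.drop_eq_getElem_cons hlt, List.all_cons, hcd, Bool.and_comm]
        rw [← List.getD_eq_getElem cs "" hlt, ← ht]
      · rw [pyAndLoop, if_neg hlt]
        have hdrop : cs.drop i = [] := List.drop_eq_nil_of_le (by omega)
        simp [hdrop]
  intro i dic docs hp
  exact main (cs.length - i) i dic docs le_rfl hp

lemma scanA_eq_find (p t : Int) (h : p < t) (l : List Int) :
    pyScanA p t l = (match l.find? (fun q => decide (p < q)) with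
                     | some q => decide (q = t)
                     | none => false) := by
  induction l with
  | nil => rfl
  | cons q rest ih =>
    rw [pyScanA]
    by_cases hq : q = t
    · subst hq
      rw [if_pos rfl, List.find?_cons_of_pos (by simpa using h)]
      simp
    · rw [if_neg hq]
      by_cases hp : p < q
      · rw [if_pos hp, List.find?_cons_of_pos (by simpa using hp)]
        simp [hq]
      · rw [if_neg hp, List.find?_cons_of_neg (by simpa using hp), ih]

lemma firstGTAux_main (l : List Int) (x : Int) (hs : l.Pairwise (· ≤ ·)) :
    ∀ lo hi, hi ≤ l.length →
      (∀ k, k < lo → ∀ (h : k < l.length), l[k] ≤ x) →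
      (∀ k, hi ≤ k → ∀ (h : k < l.length), x < l[k]) →
      (∀ k (h : k < l.length), k < pyFirstGTAux l x lo hi → l[k] ≤ x) ∧
      (∀ k (h : k < l.length), pyFirstGTAux l x lo hi ≤ k → x < l[k]) := by
  have hmono : ∀ (i j : Nat) (hij : i ≤ j) (hj : j < l.length), l[i]'(by omega) ≤ l[j] := by
    intro i j hij hj
    rcases Nat.eq_or_lt_of_le hij with rfl | hlt
    · exact le_refl _
    · exact List.pairwise_iff_getElem.mp hs i j (by omega) hj hlt
  have main : ∀ n lo hi, hi - lo ≤ n → hi ≤ l.length →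
      (∀ k, k < lo → ∀ (h : k < l.length), l[k] ≤ x) →
      (∀ k, hi ≤ k → ∀ (h : k < l.length), x < l[k]) →
      (∀ k (h : k < l.length), k < pyFirstGTAux l x lo hi → l[k] ≤ x) ∧
      (∀ k (h : k < l.length), pyFirstGTAux l x lo hi ≤ k → x < l[k]) := by
    intro n
    induction n with
    | zero =>
      intro lo hi hn hhi hlow hhigh
      have hnlt : ¬ lo < hi := by omega
      rw [pyFirstGTAux, if_neg hnlt]
      exact ⟨fun k h hk => hlow k hk h, fun k h hk => hhigh k (by omega) h⟩
    | succ n ihn =>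
      intro lo hi hn hhi hlow hhigh
      by_cases hlt : lo < hi
      · rw [pyFirstGTAux, if_pos hlt]
        simp only
        set mid := (lo + hi) / 2 with hmid
        have hmlo : lo ≤ mid := by omega
        have hmhi : mid < hi := by omega
        have hmlen : mid < l.length := by omega
        rw [List.getD_eq_getElem _ _ hmlen]
        by_cases hle : l[mid] ≤ x
        · rw [if_pos hle]
          refine ihn (mid + 1) hi (by omega) hhi ?_ hhigh
          intro k hk h
          exact le_trans (hmono k mid (by omega) hmlen) hle
        · rw [if_neg hle]
          refine ihn lo mid (by omega) (by omega) hlow ?_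
          intro k hk h
          exact lt_of_lt_of_le (by omega : x < l[mid]) (hmono mid k hk h)
      · rw [pyFirstGTAux, if_neg hlt]
        exact ⟨fun k h hk => hlow k hk h, fun k h hk => hhigh k (by omega) h⟩
  intro lo hi hhi hlow hhigh
  exact main (hi - lo) lo hi le_rfl hhi hlow hhigh

lemma find?_eq_getElem? (l : List Int) (P : Int → Bool) :
    ∀ r, (∀ k (h : k < l.length), k < r → P l[k] = false) →
      (∀ k (h : k < l.length), r ≤ k → P l[k] = true) →
      l.find? P = l[r]? := by
  induction l with
  | nil => intro r _ _; simp
  | cons a rest ih =>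
    intro r hlow hhigh
    cases r with
    | zero =>
      have : P a = true := hhigh 0 (by simp) (by omega)
      rw [List.find?_cons_of_pos this]
      simp
    | succ s =>
      have : P a = false := hlow 0 (by simp) (by omega)
      rw [List.find?_cons_of_neg (by simp [this])]
      rw [ih s (fun k h hk => hlow (k + 1) (by simpa using h) (by omega))
            (fun k h hk => hhigh (k + 1) (by simpa using h) (by omega))]
      simp

lemma step_eq (l : List Int) (hs : l.Pairwise (· ≤ ·)) (p : Int) (i : Nat) (hi : 1 ≤ i) :
    pyScanA p (p + (i : Int)) l
      = (if pyFirstGT l p < l.length then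
           (if l.getD (pyFirstGT l p) 0 = p + (i : Int) then true else false)
         else false) := by
  have hpt : p < p + (i : Int) := by
    have : (1 : Int) ≤ (i : Int) := by exact_mod_cast hi
    omega
  rw [scanA_eq_find p _ hpt]
  have hm := firstGTAux_main l p hs 0 l.length le_rfl (by omega) (fun k hk h => by omega)
  set r := pyFirstGT l p with hr
  have hfind : l.find? (fun q => decide (p < q)) = l[r]? := by
    apply find?_eq_getElem?
    · intro k h hk
      simp only [decide_eq_false_iff_not, not_lt]
      exact hm.1 k h hk
    · intro k h hk
      simp only [decide_eq_true_eq]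
      exact hm.2 k h hk
  rw [hfind]
  by_cases hrl : r < l.length
  · rw [if_pos hrl]
    rw [List.getElem?_eq_getElem hrl, List.getD_eq_getElem _ _ hrl]
    by_cases he : l[r] = p + (i : Int)
    · simp [he]
    · simp [he]
  · rw [if_neg hrl]
    rw [List.getElem?_eq_none (by omega)]

-- dic lookups agree with pls entries on every index used → the two inner loops agree
lemma check_eq (dic : PySem.Dict String (PySem.Dict Int (List Int))) (cs : List String)
    (d : Int) (pls : List (List Int))
    (hpls : ∀ j, 1 ≤ j → j < cs.length → pls.getD j [] = pySortedPos dic (cs.getD j "") d) :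
    ∀ i posIni, 1 ≤ i → pyCheckA dic cs d posIni i = pyAllOkB pls posIni cs.length i := by
  have main : ∀ n i posIni, cs.length - i ≤ n → 1 ≤ i →
      pyCheckA dic cs d posIni i = pyAllOkB pls posIni cs.length i := by
    intro n
    induction n with
    | zero =>
      intro i posIni hn h1
      have hge : ¬ i < cs.length := by omega
      rw [pyCheckA, if_neg hge, pyAllOkB, if_neg hge]
    | succ n ihn =>
      intro i posIni hn h1
      by_cases hlt : i < cs.length
      · rw [pyCheckA, if_pos hlt, pyAllOkB, if_pos hlt]
        simp only
        rw [← hpls i h1 hlt]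
        set l := pls.getD i [] with hl
        have hsorted : l.Pairwise (· ≤ ·) := by
          rw [hl, hpls i h1 hlt]
          exact PySem.List.sorted_pairwise _ _
        rw [step_eq l hsorted posIni i h1]
        by_cases hj : pyFirstGT l posIni < l.length
        · rw [if_pos hj, if_pos hj]
          by_cases he : l.getD (pyFirstGT l posIni) 0 = posIni + (i : Int)
          · rw [if_pos he, if_pos he, if_pos rfl]
            exact ihn (i + 1) posIni (by omega) (by omega)
          · rw [if_neg he, if_neg he, if_neg (by simp)]
        · rw [if_neg hj, if_neg hj, if_neg (by simp)]
      · rw [pyCheckA, if_neg hlt, pyAllOkB, if_neg hlt]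
  intro i posIni h1
  exact main (cs.length - i) i posIni le_rfl h1

lemma firstPos_eq_any (dic : PySem.Dict String (PySem.Dict Int (List Int))) (cs : List String)
    (d : Int) (poss : List Int) :
    pyFirstPosA dic cs d poss = poss.any (fun p => pyCheckA dic cs d p 1) := by
  induction poss with
  | nil => rfl
  | cons p rest ih =>
    rw [pyFirstPosA, List.any_cons]
    by_cases h : pyCheckA dic cs d p 1
    · simp [h]
    · simp [h, ih]

lemma body_eq (idx : PySem.Dict String (PySem.Dict Int (List Int))) (cs : List String)
    (hnd : ∀ t, (idx.getD t PySem.Dict.empty).keys.Nodup) :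
    pyBodyA idx cs = pyBodyB idx cs := by
  unfold pyBodyA pyBodyB
  simp only
  set t0 := cs.getD 0 "" with ht0
  set v0 := idx.getD t0 PySem.Dict.empty with hv0
  set dic0 := PySem.Dict.empty.insert t0 v0 with hdic0
  have hget0 : dic0.getD t0 PySem.Dict.empty = v0 := PySem.Dict.getD_insert_self _ _ _ _
  rw [hget0, branch_eq]
  set r := pyAndLoop idx cs 1 dic0 (PySem.List.sorted v0.keys (fun x => x)) with hr
  -- the final dic returns the index row for every query term
  have hdict0 : r.1.getD t0 PySem.Dict.empty = v0 := by
    rw [hr, andLoop_dic]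
    by_cases hm : t0 ∈ cs.drop 1
    · rw [if_pos hm, hv0]
    · rw [if_neg hm, hget0]
  have hdicj : ∀ j, 1 ≤ j → j < cs.length →
      r.1.getD (cs.getD j "") PySem.Dict.empty = idx.getD (cs.getD j "") PySem.Dict.empty := by
    intro j h1 hj
    rw [hr, andLoop_dic, if_pos]
    rw [List.getD_eq_getElem cs "" hj]
    have : cs[j] = (cs.drop 1)[j - 1]'(by simp [List.length_drop]; omega) := by
      rw [List.getElem_drop]
      congr 1
      omega
    rw [this]
    exact List.getElem_mem _
  -- rest / drop 1
  have hrest : PySem.List.slice cs (some 1) none = cs.drop 1 := by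
    rw [PySem.List.slice_from_one, ← List.drop_one]
  -- the candidate document lists agree
  have hdocs : r.2 = (PySem.List.sorted v0.keys (fun x => x)).filter
      (fun d => ((PySem.List.slice cs (some 1) none).map (fun t => idx.getD t PySem.Dict.empty)).all
        (fun pd => pd.contains d)) := by
    rw [hr, andLoop_docs idx cs hnd 1 dic0 _ (sorted_keys_pairwise_lt v0 (by rw [hv0]; exact hnd t0))]
    apply List.filter_congr
    intro d _
    rw [hrest, List.all_map]
    rfl
  rw [hdocs]
  apply PySem.List.foldl_congr_mem
  intro acc d hd
  set rest := (PySem.List.slice cs (some 1) none).map (fun t => idx.getD t PySem.Dict.empty) with hrestd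
  set pls := (v0 :: rest).map (fun pd => PySem.List.sorted (pd.getD d []) (fun x => x)) with hpls
  have hlenrest : rest.length = cs.length - 1 := by
    rw [hrestd, List.length_map, hrest, List.length_drop]
  have hpls0 : pls.getD 0 [] = pySortedPos r.1 t0 d := by
    rw [hpls]
    simp only [List.map_cons, List.getD_cons_zero]
    rw [pySortedPos, hdict0]
  have hplsj : ∀ j, 1 ≤ j → j < cs.length → pls.getD j [] = pySortedPos r.1 (cs.getD j "") d := by
    intro j h1 hj
    cases j with
    | zero => omega
    | succ m =>
      rw [pySortedPos, hdicj (m + 1) (by omega) hj]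
      rw [List.getD_eq_getElem?_getD, hpls, List.getElem?_map, List.getElem?_cons_succ,
          hrestd, List.getElem?_map, hrest]
      have hm : m < (List.drop 1 cs).length := by
        rw [List.length_drop]; omega
      rw [List.getElem?_eq_getElem hm]
      simp only [Option.map_some, Option.getD_some]
      rw [List.getElem_drop]
      rw [List.getD_eq_getElem cs "" hj]
      simp only [Nat.add_comm 1 m]
  have hfun : (fun p => pyCheckA r.1 cs d p 1) = (fun p => pyAllOkB pls p cs.length 1) :=
    funext (fun p => check_eq r.1 cs d pls hplsj 1 p le_rfl)
  rw [firstPos_eq_any, hpls0, hfun]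

-- ===== VERDICT (by name: the statement is the Claim_ definition above) =====
theorem busca_posicional_spec : Claim_equal_busca_posicional := by
  intro indice consulta _hdom hpre
  unfold Spec_busca_posicional busca_posicional busca_posicional_alt
  exact body_eq (pyMkIndex indice) (pyParse consulta) (keys_nodup_of_pre indice hpre)
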